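-- pv_equiv track=rewrite | github.com/lschanne/python-miscellaneous | sudoku_solver.py | GetAvailableNumbers
-- ===== SOURCE A (Python) =====
-- def GetAvailableNumbers(grid, row, col):
--     availableNumbers = set(range(1,10))
--     square = 3 * (row // 3) + (col // 3)
--     for rowIdx in range(9):
--         for colIdx in range(9):
--             squareIdx = 3 * (rowIdx // 3) + (colIdx // 3)
--             if rowIdx == row or colIdx == col or squareIdx == square:
--                 availableNumbers -= {grid[rowIdx][colIdx]}
--     return availableNumbers
-- ===== SOURCE B (Python) =====
-- def GetAvailableNumbers(grid, row, col):
--     square = 3 * (row // 3) + col // 3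
--     def conflicts(d):
--         for r in range(9):
--             for c in range(9):
--                 if (r == row or c == col or 3 * (r // 3) + c // 3 == square) and grid[r][c] == d:
--                     return True
--         return False
--     return {d for d in range(1, 10) if not conflicts(d)}
-- ===== Notes on version B (the rewrite author's own statement) =====
-- stated objective: alternative
-- what changed: A scans the 81 cells subtracting each conflicting value from a running availability set; B inverts the computation: for each digit 1..9 it asks whether some cell sharing the row, column or square holds that digit (an early-exit conflict test) and keeps the digits with no conflict.
import Mathlib
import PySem

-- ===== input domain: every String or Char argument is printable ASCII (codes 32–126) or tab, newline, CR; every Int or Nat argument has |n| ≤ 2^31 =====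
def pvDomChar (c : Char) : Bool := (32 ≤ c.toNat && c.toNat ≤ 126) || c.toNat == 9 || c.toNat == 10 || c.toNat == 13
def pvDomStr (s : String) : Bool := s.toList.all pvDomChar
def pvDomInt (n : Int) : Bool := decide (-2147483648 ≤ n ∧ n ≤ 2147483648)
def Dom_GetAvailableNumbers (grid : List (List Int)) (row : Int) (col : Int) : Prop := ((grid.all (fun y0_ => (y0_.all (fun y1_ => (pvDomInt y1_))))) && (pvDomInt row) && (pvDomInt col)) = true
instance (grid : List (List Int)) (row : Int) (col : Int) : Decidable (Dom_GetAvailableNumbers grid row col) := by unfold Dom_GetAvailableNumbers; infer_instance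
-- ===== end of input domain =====

-- B inverts A's computation: instead of scanning the 81 cells and subtracting each conflicting
-- value from a running set, B asks for each digit 1..9 whether some peer cell holds it and
-- keeps the digits with no conflict; objective: alternative.

-- ===== PORT A =====
def GetAvailableNumbers (grid : List (List Int)) (row : Int) (col : Int) : List Int :=
  let availableNumbers : PySem.Set Int := PySem.Set.ofList (PySem.List.pyRange 1 10 1)
  let square := 3 * PySem.Int.floordiv row 3 + PySem.Int.floordiv col 3
  (PySem.List.pyRange 0 9 1).foldl (fun availableNumbers rowIdx =>
    (PySem.List.pyRange 0 9 1).foldl (fun availableNumbers colIdx =>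
      if rowIdx = row ∨ colIdx = col ∨
          3 * PySem.Int.floordiv rowIdx 3 + PySem.Int.floordiv colIdx 3 = square then
        PySem.Set.diff availableNumbers
          [PySem.List.pyGetD (PySem.List.pyGetD grid rowIdx []) colIdx 0]
      else availableNumbers) availableNumbers) availableNumbers

-- ===== PORT B =====
def GetAvailableNumbers_alt (grid : List (List Int)) (row : Int) (col : Int) : List Int :=
  let square := 3 * PySem.Int.floordiv row 3 + PySem.Int.floordiv col 3
  let conflicts : Int → Bool := fun d =>
    (PySem.List.pyRange 0 9 1).any (fun r =>
      (PySem.List.pyRange 0 9 1).any (fun c =>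
        decide (r = row ∨ c = col ∨
          3 * PySem.Int.floordiv r 3 + PySem.Int.floordiv c 3 = square) &&
        decide (PySem.List.pyGetD (PySem.List.pyGetD grid r []) c 0 = d)))
  PySem.Set.ofList ((PySem.List.pyRange 1 10 1).filter (fun d => !conflicts d))

-- ===== PRECONDITION & SPEC =====
-- Pre_ is exactly the set of inputs on which the Python A returns (no IndexError): every cell
-- (r, c) of the 9x9 scan that A actually indexes — those sharing the row, the column or the
-- square index with (row, col) — must exist in the grid.
def Pre_GetAvailableNumbers (grid : List (List Int)) (row : Int) (col : Int) : Prop :=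
  ∀ r : Nat, r < 9 → ∀ c : Nat, c < 9 →
    ((r : Int) = row ∨ (c : Int) = col ∨
      3 * PySem.Int.floordiv (r : Int) 3 + PySem.Int.floordiv (c : Int) 3 =
        3 * PySem.Int.floordiv row 3 + PySem.Int.floordiv col 3) →
    (r < grid.length ∧ c < (PySem.List.pyGetD grid (r : Int) []).length)
instance (grid : List (List Int)) (row : Int) (col : Int) : Decidable (Pre_GetAvailableNumbers grid row col) := by unfold Pre_GetAvailableNumbers; infer_instance

def pvWitness_GetAvailableNumbers : List (List Int) × Int × Int :=
  ([[0,0,0,0,0,0,0,0,0],[0,0,0,0,0,0,0,0,0],[0,0,0,0,0,0,0,0,0],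
    [0,0,0,0,0,0,0,0,0],[0,0,0,0,0,0,0,0,0],[0,0,0,0,0,0,0,0,0],
    [0,0,0,0,0,0,0,0,0],[0,0,0,0,0,0,0,0,0],[0,0,0,0,0,0,0,0,0]], 0, 0)

def Spec_GetAvailableNumbers (grid : List (List Int)) (row : Int) (col : Int) (out : List Int) : Prop := out = GetAvailableNumbers_alt grid row col
instance (grid : List (List Int)) (row : Int) (col : Int) (out : List Int) : Decidable (Spec_GetAvailableNumbers grid row col out) := by unfold Spec_GetAvailableNumbers; infer_instance

-- ===== CLAIM (what is proved, stated in full; the proofs are below) =====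
def Claim_equal_GetAvailableNumbers : Prop := ∀ (grid : List (List Int)) (row : Int) (col : Int), Dom_GetAvailableNumbers grid row col → Pre_GetAvailableNumbers grid row col → Spec_GetAvailableNumbers grid row col (GetAvailableNumbers grid row col)

-- ===== LEMMAS AND PROOFS =====

-- Python's  s -= {v}  on our Set representation is a filter.
theorem pvDiffSingleton (s : List Int) (v : Int) :
    PySem.Set.diff s [v] = s.filter (fun y => !decide (y = v)) := by
  simp [PySem.Set.diff]

-- Folding a per-element filter over a list is one filter by the conjunction.
theorem pvFoldFilter {α : Type} (L : List α) (q : α → Int → Bool) (s : List Int) :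
    L.foldl (fun s a => s.filter (q a)) s = s.filter (fun y => L.all (fun a => q a y)) := by
  induction L generalizing s with
  | nil => simp
  | cons a t ih => simp [ih, List.filter_filter, Bool.and_comm]

-- A conditional filter is a filter by the guarded predicate.
theorem pvIfFilter (P : Prop) [Decidable P] (s : List Int) (g : Int → Bool) :
    (if P then s.filter g else s) = s.filter (fun y => !decide P || g y) := by
  split_ifs with h <;> simp [h]

-- Pushing PySem.Set.ofList through: set(xs) of a duplicate-free list is the list itself.
theorem pvFoldlAdd (t : List Int) : ∀ s : List Int, (∀ x ∈ t, x ∉ s) → t.Nodup →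
    t.foldl PySem.Set.add s = s ++ t := by
  induction t with
  | nil => simp
  | cons x t ih =>
    intro s hd hn
    have hmem : x ∉ s := hd x List.mem_cons_self
    rw [List.foldl_cons]
    have hadd : PySem.Set.add s x = s ++ [x] := by simp [PySem.Set.add, hmem]
    rw [hadd, ih (s ++ [x]) ?_ hn.of_cons]
    · simp
    · intro y hy
      simp only [List.mem_append, List.mem_singleton]
      rintro (hys | rfl)
      · exact hd y (List.mem_cons_of_mem _ hy) hys
      · exact (List.nodup_cons.mp hn).1 hy

theorem pvOfListNodup (l : List Int) (h : l.Nodup) : PySem.Set.ofList l = l := by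
  have := pvFoldlAdd l [] (by simp) h
  simpa [PySem.Set.ofList] using this

-- ===== VERDICT (by name: the statement is the Claim_ definition above) =====
set_option maxHeartbeats 1000000 in
theorem GetAvailableNumbers_spec : Claim_equal_GetAvailableNumbers := by
  intro grid row col _hdom _hpre
  unfold Spec_GetAvailableNumbers
  simp only [GetAvailableNumbers, GetAvailableNumbers_alt]
  simp only [pvDiffSingleton, pvIfFilter, pvFoldFilter]
  rw [pvOfListNodup _ (List.Nodup.filter _ (by decide)),
      pvOfListNodup _ (by decide : (PySem.List.pyRange 1 10 1).Nodup)]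
  apply List.filter_congr
  intro y _
  apply Bool.eq_iff_iff.mpr
  simp only [List.all_eq_true, List.any_eq_true, PySem.List.mem_pyRange_one, Bool.or_eq_true,
    Bool.and_eq_true, Bool.not_eq_true', Bool.eq_false_iff, ne_eq, decide_eq_true_eq]
  constructor
  · rintro h ⟨r, hr, c, hc, hcond, hval⟩
    rcases h r hr c hc with hnc | hnv
    · exact hnc hcond
    · exact hnv hval.symm
  · intro h r hr c hc
    by_cases hcond : (r = row ∨ c = col ∨
        3 * PySem.Int.floordiv r 3 + PySem.Int.floordiv c 3 =
          3 * PySem.Int.floordiv row 3 + PySem.Int.floordiv col 3)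
    · right
      intro hy
      exact h ⟨r, hr, c, hc, hcond, hy.symm⟩
    · exact Or.inl hcond
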